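-- pv_equiv track=rewrite | github.com/Lizosoma/proga | 1 семестр/Псевдографика (сделано)/chessboard_cells.py | chessboard_cells
-- ===== SOURCE A (Python) =====
-- def chessboard_cells(n, k):
--
--     l = ''
--     for i in range(n):
--         s = ''
--         for j in range(n):
--             if (i + j) % 2 == 0:
--                 s += '1' * k
--             else:
--                 s += '0' * k
--         for j in range(k):
--             l += s + '\n'
--     return l
-- ===== SOURCE B (Python) =====
-- def chessboard_cells(n, k):
--     even = ''.join('1' * k if j % 2 == 0 else '0' * k for j in range(n))
--     odd = ''.join('0' * k if j % 2 == 0 else '1' * k for j in range(n))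
--     return ''.join(((even if i % 2 == 0 else odd) + '\n') * k for i in range(n))
-- ===== Notes on version B (the rewrite author's own statement) =====
-- stated objective: simpler
-- what changed: Precomputes the two distinct row strings once and emits each board line with string multiplication ((row+'\n')*k) joined over the rows, instead of rebuilding every row cell-by-cell inside a nested append loop.
import Mathlib
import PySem

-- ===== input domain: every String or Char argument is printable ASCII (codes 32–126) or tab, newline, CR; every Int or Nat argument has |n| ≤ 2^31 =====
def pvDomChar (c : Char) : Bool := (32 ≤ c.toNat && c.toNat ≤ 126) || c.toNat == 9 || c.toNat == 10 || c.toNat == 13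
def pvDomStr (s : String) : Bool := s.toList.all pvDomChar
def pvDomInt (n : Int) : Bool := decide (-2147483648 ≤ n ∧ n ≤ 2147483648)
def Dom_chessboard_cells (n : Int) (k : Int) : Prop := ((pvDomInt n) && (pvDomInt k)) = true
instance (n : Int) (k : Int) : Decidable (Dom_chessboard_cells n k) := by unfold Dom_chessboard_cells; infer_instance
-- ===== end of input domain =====

-- B precomputes the two distinct row strings once and emits each board line by string
-- multiplication joined over the rows, replacing A's per-row cell-by-cell nested append loops (objective: simpler).

-- ===== PORT A =====
-- Literal port of A; strings are ported as List Char (PySem convention) and wrapped with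
-- String.ofList at the end; '1' * k is PySem.List.pyRepeat ['1'] k (Python str*int, exact).
def chessboard_cells (n : Int) (k : Int) : String :=
  let l : List Char :=
    (PySem.List.pyRange 0 n).foldl (fun l i =>
      let s : List Char :=
        (PySem.List.pyRange 0 n).foldl (fun s j =>
          if PySem.Int.mod (i + j) 2 = 0 then s ++ PySem.List.pyRepeat ['1'] k
          else s ++ PySem.List.pyRepeat ['0'] k) []
      (PySem.List.pyRange 0 k).foldl (fun l _ => l ++ (s ++ ['\n'])) l) []
  String.ofList l

-- ===== PORT B =====
-- ''.join over a generator is List.flatten of the mapped list (join with empty separator, exact).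
def chessboard_cells_alt (n : Int) (k : Int) : String :=
  let even : List Char :=
    ((PySem.List.pyRange 0 n).map (fun j =>
      if PySem.Int.mod j 2 = 0 then PySem.List.pyRepeat ['1'] k
      else PySem.List.pyRepeat ['0'] k)).flatten
  let odd : List Char :=
    ((PySem.List.pyRange 0 n).map (fun j =>
      if PySem.Int.mod j 2 = 0 then PySem.List.pyRepeat ['0'] k
      else PySem.List.pyRepeat ['1'] k)).flatten
  String.ofList (((PySem.List.pyRange 0 n).map (fun i =>
      PySem.List.pyRepeat ((if PySem.Int.mod i 2 = 0 then even else odd) ++ ['\n']) k)).flatten)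

-- ===== PRECONDITION & SPEC =====
def Spec_chessboard_cells (n : Int) (k : Int) (out : String) : Prop := out = chessboard_cells_alt n k
instance (n : Int) (k : Int) (out : String) : Decidable (Spec_chessboard_cells n k out) := by unfold Spec_chessboard_cells; infer_instance

-- ===== CLAIM (what is proved, stated in full; the proofs are below) =====
def Claim_equal_chessboard_cells : Prop := ∀ (n : Int) (k : Int), Dom_chessboard_cells n k → Spec_chessboard_cells n k (chessboard_cells n k)

-- ===== LEMMAS AND PROOFS =====

-- flatMap of a constant function is a repetition
theorem flatMap_const_eq_pyRepeat (a b : Int) (t : List Char) :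
    (PySem.List.pyRange a b).flatMap (fun _ => t) = PySem.List.pyRepeat t (b - a) := by
  have h : ∀ (xs : List Int), xs.flatMap (fun _ => t) = (List.replicate xs.length t).flatten := by
    intro xs; induction xs with
    | nil => simp
    | cons x xs ih => simp [List.flatMap_cons, ih, List.replicate_succ]
  rw [h, PySem.List.length_pyRange_one]
  rfl

-- the inner k-loop of A appends a constant block k times
theorem foldl_const_append (k : Int) (l t : List Char) :
    (PySem.List.pyRange 0 k).foldl (fun l _ => l ++ t) l = l ++ PySem.List.pyRepeat t k := by
  rw [PySem.List.foldl_append_eq_flatMap (fun _ => t), flatMap_const_eq_pyRepeat]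
  simp

-- A's row builder in flatMap form
theorem rowA_eq (n k i : Int) :
    (PySem.List.pyRange 0 n).foldl (fun s j =>
        if PySem.Int.mod (i + j) 2 = 0 then s ++ PySem.List.pyRepeat ['1'] k
        else s ++ PySem.List.pyRepeat ['0'] k) [] =
    ((PySem.List.pyRange 0 n).map (fun j =>
        if PySem.Int.mod (i + j) 2 = 0 then PySem.List.pyRepeat ['1'] k
        else PySem.List.pyRepeat ['0'] k)).flatten := by
  have hf : (fun (s : List Char) (j : Int) =>
        if PySem.Int.mod (i + j) 2 = 0 then s ++ PySem.List.pyRepeat ['1'] k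
        else s ++ PySem.List.pyRepeat ['0'] k) =
      (fun s j => s ++ (if PySem.Int.mod (i + j) 2 = 0 then PySem.List.pyRepeat ['1'] k
        else PySem.List.pyRepeat ['0'] k)) := by
    funext s j; split <;> rfl
  rw [hf, PySem.List.foldl_append_eq_flatMap, List.flatMap_def]
  simp

-- parity transfer: the inner condition depends only on the parities of i and j
theorem mod_add_two (i j : Int) (h : PySem.Int.mod i 2 = 0) :
    (PySem.Int.mod (i + j) 2 = 0 ↔ PySem.Int.mod j 2 = 0) := by
  rw [PySem.Int.mod_eq_emod_of_pos (by norm_num),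
      PySem.Int.mod_eq_emod_of_pos (by norm_num)] at *
  omega

theorem mod_add_two' (i j : Int) (h : PySem.Int.mod i 2 = 1) :
    (PySem.Int.mod (i + j) 2 = 0 ↔ ¬ PySem.Int.mod j 2 = 0) := by
  rw [PySem.Int.mod_eq_emod_of_pos (by norm_num),
      PySem.Int.mod_eq_emod_of_pos (by norm_num)] at *
  omega

theorem chessboard_cells_spec_aux (n k : Int) :
    chessboard_cells n k = chessboard_cells_alt n k := by
  unfold chessboard_cells chessboard_cells_alt
  dsimp only
  congr 1
  have h1 : (fun (l : List Char) (i : Int) =>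
      (PySem.List.pyRange 0 k).foldl (fun l _ =>
        l ++ (((PySem.List.pyRange 0 n).foldl (fun s j =>
          if PySem.Int.mod (i + j) 2 = 0 then s ++ PySem.List.pyRepeat ['1'] k
          else s ++ PySem.List.pyRepeat ['0'] k) []) ++ ['\n'])) l) =
      (fun l i => l ++ PySem.List.pyRepeat
        ((((PySem.List.pyRange 0 n).map (fun j =>
          if PySem.Int.mod (i + j) 2 = 0 then PySem.List.pyRepeat ['1'] k
          else PySem.List.pyRepeat ['0'] k)).flatten) ++ ['\n']) k) := by
    funext l i
    rw [foldl_const_append, rowA_eq]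
  rw [h1, PySem.List.foldl_append_eq_flatMap, List.flatMap_def, List.nil_append]
  congr 1
  apply List.map_congr_left
  intro i _
  rcases PySem.Int.mod_two_eq i with h | h
  · rw [if_pos h]
    congr 3
    apply List.map_congr_left
    intro j _
    rw [if_congr (mod_add_two i j h) rfl rfl]
  · rw [if_neg (by rw [h]; norm_num)]
    congr 3
    apply List.map_congr_left
    intro j _
    rw [if_congr (mod_add_two' i j h) rfl rfl, ite_not]

-- ===== VERDICT (by name: the statement is the Claim_ definition above) =====
theorem chessboard_cells_spec : Claim_equal_chessboard_cells := by
  intro n k _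
  exact chessboard_cells_spec_aux n k
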